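-- pv_equiv track=rewrite | github.com/Just-PH/patent_pipeline | scripts/bench_score_extraction.py | normalize_id
-- ===== SOURCE A (Python) =====
-- def normalize_id(s: str) -> str:
--     s = s.strip()
--     # basename if it's a path
--     s = s.split("/")[-1].split("\\")[-1]
--     # strip common extensions
--     for ext in (".txt", ".png", ".pdf", ".jpg", ".jpeg", ".tif", ".tiff"):
--         if s.lower().endswith(ext):
--             s = s[: -len(ext)]
--             break
--     return s.strip()
-- ===== SOURCE B (Python) =====
-- _KNOWN_EXTS = frozenset({"txt", "png", "pdf", "jpg", "jpeg", "tif", "tiff"})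
--
-- def normalize_id(s: str) -> str:
--     s = s.strip()
--     # basename if it's a path
--     s = s.split("/")[-1].split("\\")[-1]
--     # locate the last dot once; drop the suffix iff it is a known extension
--     base, dot, ext = s.rpartition(".")
--     if dot and ext.lower() in _KNOWN_EXTS:
--         s = base
--     return s.strip()
-- ===== Notes on version B (the rewrite author's own statement) =====
-- stated objective: idiomatic
-- what changed: Instead of looping over the seven extensions testing each with a lowered endswith, B locates the last dot once with rpartition and does a single set-membership test on the lowered suffix.
import Mathlib
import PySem

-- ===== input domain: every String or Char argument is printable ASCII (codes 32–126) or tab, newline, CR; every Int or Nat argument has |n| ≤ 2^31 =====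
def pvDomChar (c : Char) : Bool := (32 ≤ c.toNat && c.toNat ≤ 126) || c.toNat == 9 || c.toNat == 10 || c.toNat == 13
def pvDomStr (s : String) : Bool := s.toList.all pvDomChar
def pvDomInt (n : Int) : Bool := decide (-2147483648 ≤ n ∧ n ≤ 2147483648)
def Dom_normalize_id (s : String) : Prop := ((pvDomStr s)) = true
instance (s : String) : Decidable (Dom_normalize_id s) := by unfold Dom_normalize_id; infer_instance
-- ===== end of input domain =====

-- B replaces A's loop of seven case-insensitive endswith probes by one rpartition(".") on the
-- last dot followed by a single set-membership test of the extension; same value everywhere (proved).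

-- ===== PORT A =====
-- the for-loop over the extension tuple, with its break (first match wins)
def stripExtLoop : List String → String → String
  | [], s => s
  | ext :: rest, s =>
    if PySem.Str.endswith (PySem.Str.lower s) ext then
      PySem.Str.slice s none (some (-(ext.length : Int)))
    else stripExtLoop rest s

def normalize_id (s : String) : String :=
  let s1 := PySem.Str.strip s
  let s2 := (PySem.List.pyGet? ((PySem.Str.split? s1 "/").getD []) (-1)).getD ""
  let s3 := (PySem.List.pyGet? ((PySem.Str.split? s2 "\\").getD []) (-1)).getD ""
  PySem.Str.strip
    (stripExtLoop [".txt", ".png", ".pdf", ".jpg", ".jpeg", ".tif", ".tiff"] s3)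

-- ===== PORT B =====
def pvKnownExts : List String := ["txt", "png", "pdf", "jpg", "jpeg", "tif", "tiff"]

-- s.rpartition(".") ported by hand via rfind (exact: base = s[:i], ext = s[i+1:], 'dot' truthy ↔ i ≥ 0)
def normalize_id_alt (s : String) : String :=
  let s1 := PySem.Str.strip s
  let s2 := (PySem.List.pyGet? ((PySem.Str.split? s1 "/").getD []) (-1)).getD ""
  let s3 := (PySem.List.pyGet? ((PySem.Str.split? s2 "\\").getD []) (-1)).getD ""
  let i := PySem.Str.rfind s3 "."
  let s4 :=
    if 0 ≤ i ∧ pvKnownExts.contains (PySem.Str.lower (PySem.Str.slice s3 (some (i + 1)) none)) then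
      PySem.Str.slice s3 none (some i)
    else s3
  PySem.Str.strip s4

-- ===== PRECONDITION & SPEC =====
def Spec_normalize_id (s : String) (out : String) : Prop := out = normalize_id_alt s
instance (s : String) (out : String) : Decidable (Spec_normalize_id s out) := by unfold Spec_normalize_id; infer_instance

-- ===== CLAIM (what is proved, stated in full; the proofs are below) =====
def Claim_equal_normalize_id : Prop := ∀ (s : String), Dom_normalize_id s → Spec_normalize_id s (normalize_id s)

-- ===== LEMMAS AND PROOFS =====
lemma str_beq_eq (a b : String) : (a == b) = decide (a.toList = b.toList) := by
  by_cases h : a = b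
  · subst h; simp
  · simp [h, String.toList_inj]

lemma endswith_eq_drop (l p : List Char) :
    PySem.Chars.endswith l p = decide (l.drop (l.length - p.length) = p) := by
  by_cases h : p <:+ l
  · obtain ⟨u, rfl⟩ := h
    simp [PySem.Chars.endswith_iff, List.suffix_append]
  · have h2 : l.drop (l.length - p.length) ≠ p := fun he => h (he ▸ List.drop_suffix _ _)
    simp only [h2, decide_false]
    exact Bool.eq_false_iff.mpr (fun hh => h ((PySem.Chars.endswith_iff l p).1 hh))

def lowSuf (t : String) (k : Nat) : List Char :=
  (PySem.Chars.lower t.toList).drop (t.toList.length - k)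

lemma endswith_lower_eq (t p : String) :
    PySem.Str.endswith (PySem.Str.lower t) p
      = decide (lowSuf t p.toList.length = p.toList) := by
  have hl : (PySem.Str.lower t).toList.length = t.toList.length := by
    simp [PySem.Str.toList_lower, PySem.Chars.lower]
  rw [PySem.Str.endswith_eq, endswith_eq_drop, hl]
  simp [lowSuf, PySem.Str.toList_lower]

lemma lowSuf_len (t : String) (k : Nat) (h : (lowSuf t k).length = k) : k ≤ t.toList.length := by
  by_contra hlt
  have hlow : (PySem.Chars.lower t.toList).length = t.toList.length := by
    simp [PySem.Chars.lower]
  simp [lowSuf, hlow] at h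
  have := @String.length_toList t
  omega

lemma lowSuf_eq_lower_drop (t : String) (k : Nat) :
    lowSuf t k = PySem.Chars.lower (t.toList.drop (t.toList.length - k)) := by
  simp [lowSuf, PySem.Chars.lower, List.map_drop]

lemma lowerChar_dot_eq (c : Char) (h : PySem.Chars.lowerChar c = '.') : c = '.' := by
  unfold PySem.Chars.lowerChar at h
  split at h
  · next hc =>
      exfalso
      simp only [PySem.Chars.isupper, Bool.and_eq_true, decide_eq_true_eq, Char.le_def] at hc
      obtain ⟨h1, h2⟩ := hc
      have hA : ('A' : Char).val = 65 := by decide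
      have hZ : ('Z' : Char).val = 90 := by decide
      rw [hA] at h1; rw [hZ] at h2
      have h1' : 65 ≤ c.toNat := h1
      have h2' : c.toNat ≤ 90 := h2
      have hv : (c.toNat + 32).isValidChar := by left; omega
      have h3 : (Char.ofNat (c.toNat + 32)).toNat = c.toNat + 32 := by
        rw [Char.toNat_ofNat, if_pos hv]
      have := congrArg Char.toNat h
      rw [h3] at this
      have hd : ('.' : Char).toNat = 46 := by decide
      rw [hd] at this
      omega
  · exact h

-- ['.'] is a prefix of (l.drop j) iff the char at j is a dot
lemma isPrefixOf_dot_iff (l : List Char) (j : Nat) :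
    (['.'].isPrefixOf (l.drop j)) = true ↔ l[j]? = some '.' := by
  rw [List.isPrefixOf_iff_prefix]
  constructor
  · intro h
    obtain ⟨u, hu⟩ := h
    have : (l.drop j).head? = some '.' := by rw [← hu]; rfl
    rwa [List.head?_drop] at this
  · intro h
    have h1 : (l.drop j).head? = some '.' := by rwa [List.head?_drop]
    cases hd : l.drop j with
    | nil => simp [hd] at h1
    | cons a u =>
        rw [hd] at h1
        simp at h1
        exact ⟨u, by simp [h1]⟩

lemma rfind_go_eq_of (l : List Char) (k m : Nat) (hm : m ≤ k)
    (hdot : l[m]? = some '.')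
    (hafter : ∀ j, m < j → j ≤ k → l[j]? ≠ some '.') :
    PySem.Chars.rfind.go l ['.'] k = (m : Int) := by
  induction k with
  | zero =>
      have : m = 0 := by omega
      subst this
      unfold PySem.Chars.rfind.go
      rw [if_pos (by simpa using (isPrefixOf_dot_iff l 0).2 hdot)]
      simp
  | succ j ih =>
      unfold PySem.Chars.rfind.go
      by_cases hmk : m = j + 1
      · subst hmk
        rw [if_pos ((isPrefixOf_dot_iff l (j+1)).2 hdot)]
      · have hmj : m ≤ j := by omega
        rw [if_neg]
        · exact ih hmj (fun j' h1 h2 => hafter j' h1 (by omega))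
        · intro hpre
          exact hafter (j+1) (by omega) (le_refl _) ((isPrefixOf_dot_iff l (j+1)).1 hpre)

lemma rfind_go_mem (l : List Char) (k : Nat) (h : PySem.Chars.rfind.go l ['.'] k ≠ -1) :
    ∃ m : Nat, PySem.Chars.rfind.go l ['.'] k = (m : Int) ∧ m ≤ k ∧ l[m]? = some '.' := by
  induction k with
  | zero =>
      unfold PySem.Chars.rfind.go at h ⊢
      split at h
      · next hp => exact ⟨0, by rw [if_pos hp]; rfl, le_refl _, (isPrefixOf_dot_iff l 0).1 (by simpa using hp)⟩
      · exact absurd rfl h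
  | succ j ih =>
      unfold PySem.Chars.rfind.go at h ⊢
      split at h
      · next hp => exact ⟨j + 1, by rw [if_pos hp], le_refl _, (isPrefixOf_dot_iff l (j+1)).1 hp⟩
      · next hp =>
          obtain ⟨m, h1, h2, h3⟩ := ih h
          exact ⟨m, by rw [if_neg hp]; exact h1, by omega, h3⟩

-- If lower l ends with '.'::e (e dot-free), the last dot of l sits exactly at length - e.length - 1.
lemma rfind_of_lowSuf (t : String) (e : List Char) (hdot : '.' ∉ e)
    (h : lowSuf t (e.length + 1) = '.' :: e) :
    PySem.Chars.rfind t.toList ['.'] = ((t.toList.length - e.length - 1 : Nat) : Int) := by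
  have hlen : e.length + 1 ≤ t.toList.length := by
    apply lowSuf_len
    rw [h]; simp
  set l := t.toList with hl
  set m : Nat := l.length - e.length - 1 with hmdef
  have hms : l.length - (e.length + 1) = m := by omega
  rw [lowSuf_eq_lower_drop, hms] at h
  have hdropm : PySem.Chars.lower (l.drop m) = '.' :: e := h
  -- char at m is '.'
  have hhead : l[m]? = some '.' := by
    have hne : l.drop m ≠ [] := by
      intro hnil
      rw [hnil] at hdropm
      simp [PySem.Chars.lower] at hdropm
    cases hd : l.drop m with
    | nil => exact absurd hd hne
    | cons a u =>
        rw [hd] at hdropm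
        simp only [PySem.Chars.lower, List.map_cons, List.cons.injEq] at hdropm
        have ha : a = '.' := lowerChar_dot_eq a hdropm.1
        rw [← List.head?_drop, hd, ha]
        rfl
  -- no '.' after m
  have hafter : ∀ j, m < j → j ≤ l.length → l[j]? ≠ some '.' := by
    intro j h1 h2 hj
    by_cases hjl : j < l.length
    · -- l[j] lowers into e, but '.' lowers to '.', and '.' ∉ e
      obtain ⟨hmlt, hm'⟩ := List.getElem?_eq_some_iff.1 hhead
      have hd2 : l.drop m = '.' :: l.drop (m + 1) := by
        rw [List.drop_eq_getElem_cons hmlt, hm']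
      have hdrop1 : PySem.Chars.lower (l.drop (m + 1)) = e := by
        rw [hd2] at hdropm
        exact (by simpa [PySem.Chars.lower] using hdropm : _ ∧ _).2
      have hjd : (l.drop (m + 1))[j - m - 1]? = some '.' := by
        rw [List.getElem?_drop, show m + 1 + (j - m - 1) = j by omega]
        exact hj
      have hge : e[j - m - 1]? = some (PySem.Chars.lowerChar '.') := by
        rw [← hdrop1]
        unfold PySem.Chars.lower
        rw [List.getElem?_map, hjd]
        rfl
      have hmem : PySem.Chars.lowerChar '.' ∈ e := List.mem_of_getElem? hge
      have hdl : PySem.Chars.lowerChar '.' = '.' := by decide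
      rw [hdl] at hmem
      exact hdot hmem
    · have hnone : l[j]? = none := by
        rw [List.getElem?_eq_none_iff]; omega
      rw [hnone] at hj
      simp at hj
  have : PySem.Chars.rfind l ['.'] = PySem.Chars.rfind.go l ['.'] l.length := rfl
  rw [this]
  exact rfind_go_eq_of l l.length m (by omega) hhead hafter

-- B's core step on the basename: rpartition-by-rfind and the single membership test
def bCore (t : String) : String :=
  if 0 ≤ PySem.Str.rfind t "." ∧
      pvKnownExts.contains
        (PySem.Str.lower (PySem.Str.slice t (some (PySem.Str.rfind t "." + 1)) none)) then
    PySem.Str.slice t none (some (PySem.Str.rfind t "."))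
  else t

lemma rfind_str_eq (t : String) : PySem.Str.rfind t "." = PySem.Chars.rfind t.toList ['.'] := by
  rw [PySem.Str.rfind_eq]
  congr 1

lemma lowSuf_of_dot_at (t : String) (m : Nat) (hm : t.toList[m]? = some '.') :
    lowSuf t (t.toList.length - m) = '.' :: PySem.Chars.lower (t.toList.drop (m + 1)) := by
  obtain ⟨hlt, hget⟩ := List.getElem?_eq_some_iff.1 hm
  rw [lowSuf_eq_lower_drop]
  have h1 : t.toList.length - (t.toList.length - m) = m := by omega
  rw [h1, List.drop_eq_getElem_cons hlt, hget]
  simp only [PySem.Chars.lower, List.map_cons]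
  congr 1

lemma matched (t : String) (e : List Char) (y : String) (hy : y.toList = e)
    (hymem : pvKnownExts.contains y = true) (hdot : '.' ∉ e)
    (h : lowSuf t (e.length + 1) = '.' :: e) :
    bCore t = PySem.Str.slice t none (some (-((e.length + 1 : Nat) : Int))) := by
  have hlen : e.length + 1 ≤ t.toList.length := lowSuf_len t (e.length + 1) (by rw [h]; simp)
  have hr : PySem.Chars.rfind t.toList ['.'] = ((t.toList.length - e.length - 1 : Nat) : Int) :=
    rfind_of_lowSuf t e hdot h
  have hrS : PySem.Str.rfind t "." = ((t.toList.length - e.length - 1 : Nat) : Int) := by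
    rw [rfind_str_eq, hr]
  have h' : PySem.Chars.lower (t.toList.drop (t.toList.length - (e.length + 1))) = '.' :: e := by
    rw [← lowSuf_eq_lower_drop]; exact h
  have htail : PySem.Chars.lower (t.toList.drop (t.toList.length - e.length)) = e := by
    have hd : t.toList.drop (t.toList.length - e.length)
        = (t.toList.drop (t.toList.length - (e.length + 1))).tail := by
      rw [List.tail_drop]
      congr 1
      omega
    rw [hd]
    simp only [PySem.Chars.lower] at h' ⊢
    rw [List.map_tail, h']
    rfl
  have hslice : PySem.Str.lower (PySem.Str.slice t (some (PySem.Str.rfind t "." + 1)) none) = y := by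
    apply String.toList_inj.1
    rw [hy]
    rw [hrS]
    have hc : ((t.toList.length - e.length - 1 : Nat) : Int) + 1
        = ((t.toList.length - e.length : Nat) : Int) := by
      push_cast [Nat.sub_sub]
      omega
    rw [hc]
    simp only [PySem.Str.toList_lower, PySem.Str.toList_slice,
      PySem.Chars.slice_eq_listSlice, PySem.List.slice_from_natCast]
    exact htail
  unfold bCore
  rw [if_pos ⟨by rw [hrS]; exact Int.natCast_nonneg _, by rw [hslice]; exact hymem⟩]
  apply String.toList_inj.1
  rw [hrS]
  simp only [PySem.Str.toList_slice, PySem.Chars.slice_eq_listSlice]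
  rw [PySem.List.slice_to_natCast, PySem.List.slice_to_neg_natCast _ _ (by omega : 0 < e.length + 1)]
  have hn : t.toList.length - e.length - 1 = t.toList.length - (e.length + 1) := by omega
  rw [hn]

lemma unmatched (t : String)
    (h1 : lowSuf t 4 ≠ ['.','t','x','t']) (h2 : lowSuf t 4 ≠ ['.','p','n','g'])
    (h3 : lowSuf t 4 ≠ ['.','p','d','f']) (h4 : lowSuf t 4 ≠ ['.','j','p','g'])
    (h5 : lowSuf t 5 ≠ ['.','j','p','e','g']) (h6 : lowSuf t 4 ≠ ['.','t','i','f'])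
    (h7 : lowSuf t 5 ≠ ['.','t','i','f','f']) :
    bCore t = t := by
  unfold bCore
  rw [if_neg]
  rintro ⟨hi, hc⟩
  rw [rfind_str_eq] at hi hc
  have hne : PySem.Chars.rfind t.toList ['.'] ≠ -1 := by omega
  obtain ⟨m, hgo, hmle, hdotm⟩ := rfind_go_mem t.toList t.toList.length hne
  have hrm : PySem.Chars.rfind t.toList ['.'] = (m : Int) := hgo
  have hmlt : m < t.toList.length := (List.getElem?_eq_some_iff.1 hdotm).1
  have hse : (PySem.Str.lower (PySem.Str.slice t (some (PySem.Chars.rfind t.toList ['.'] + 1)) none)).toList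
      = PySem.Chars.lower (t.toList.drop (m + 1)) := by
    rw [hrm]
    have hc1 : ((m : Int) + 1) = ((m + 1 : Nat) : Int) := by push_cast; ring
    rw [hc1]
    simp only [PySem.Str.toList_lower, PySem.Str.toList_slice,
      PySem.Chars.slice_eq_listSlice, PySem.List.slice_from_natCast]
  have hlow : lowSuf t (t.toList.length - m) = '.' :: PySem.Chars.lower (t.toList.drop (m + 1)) :=
    lowSuf_of_dot_at t m hdotm
  have hlenE : (PySem.Chars.lower (t.toList.drop (m + 1))).length = t.toList.length - m - 1 := by
    simp only [PySem.Chars.lower, List.length_map, List.length_drop]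
    omega
  simp only [pvKnownExts, List.contains_cons, List.contains_nil, Bool.or_false,
    str_beq_eq, Bool.or_eq_true, decide_eq_true_eq] at hc
  rw [hse] at hc
  rcases hc with hcase | hcase | hcase | hcase | hcase | hcase | hcase
  · rw [show ("txt" : String).toList = ['t','x','t'] from by decide] at hcase
    have hL : t.toList.length - m = 4 := by rw [hcase] at hlenE; simp only [List.length_cons, List.length_nil] at hlenE; omega
    rw [hL] at hlow
    rw [hcase] at hlow
    exact h1 hlow
  · rw [show ("png" : String).toList = ['p','n','g'] from by decide] at hcase
    have hL : t.toList.length - m = 4 := by rw [hcase] at hlenE; simp only [List.length_cons, List.length_nil] at hlenE; omega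
    rw [hL] at hlow
    rw [hcase] at hlow
    exact h2 hlow
  · rw [show ("pdf" : String).toList = ['p','d','f'] from by decide] at hcase
    have hL : t.toList.length - m = 4 := by rw [hcase] at hlenE; simp only [List.length_cons, List.length_nil] at hlenE; omega
    rw [hL] at hlow
    rw [hcase] at hlow
    exact h3 hlow
  · rw [show ("jpg" : String).toList = ['j','p','g'] from by decide] at hcase
    have hL : t.toList.length - m = 4 := by rw [hcase] at hlenE; simp only [List.length_cons, List.length_nil] at hlenE; omega
    rw [hL] at hlow
    rw [hcase] at hlow
    exact h4 hlow
  · rw [show ("jpeg" : String).toList = ['j','p','e','g'] from by decide] at hcase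
    have hL : t.toList.length - m = 5 := by rw [hcase] at hlenE; simp only [List.length_cons, List.length_nil] at hlenE; omega
    rw [hL] at hlow
    rw [hcase] at hlow
    exact h5 hlow
  · rw [show ("tif" : String).toList = ['t','i','f'] from by decide] at hcase
    have hL : t.toList.length - m = 4 := by rw [hcase] at hlenE; simp only [List.length_cons, List.length_nil] at hlenE; omega
    rw [hL] at hlow
    rw [hcase] at hlow
    exact h6 hlow
  · rw [show ("tiff" : String).toList = ['t','i','f','f'] from by decide] at hcase
    have hL : t.toList.length - m = 5 := by rw [hcase] at hlenE; simp only [List.length_cons, List.length_nil] at hlenE; omega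
    rw [hL] at hlow
    rw [hcase] at hlow
    exact h7 hlow

lemma key (t : String) :
    stripExtLoop [".txt", ".png", ".pdf", ".jpg", ".jpeg", ".tif", ".tiff"] t = bCore t := by
  simp only [stripExtLoop, endswith_lower_eq, show (".txt" : String).toList = ['.','t','x','t'] from by decide, show (".txt" : String).length = 4 from by decide, show (".png" : String).toList = ['.','p','n','g'] from by decide, show (".png" : String).length = 4 from by decide, show (".pdf" : String).toList = ['.','p','d','f'] from by decide, show (".pdf" : String).length = 4 from by decide, show (".jpg" : String).toList = ['.','j','p','g'] from by decide, show (".jpg" : String).length = 4 from by decide, show (".jpeg" : String).toList = ['.','j','p','e','g'] from by decide, show (".jpeg" : String).length = 5 from by decide, show (".tif" : String).toList = ['.','t','i','f'] from by decide, show (".tif" : String).length = 4 from by decide, show (".tiff" : String).toList = ['.','t','i','f','f'] from by decide, show (".tiff" : String).length = 5 from by decide,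
    List.length_cons, List.length_nil]
  by_cases c1 : lowSuf t 4 = ['.','t','x','t']
  · rw [matched t ['t','x','t'] "txt" (by decide) (by decide) (by decide) (by simpa using c1)]
    simp [c1]
  by_cases c2 : lowSuf t 4 = ['.','p','n','g']
  · rw [matched t ['p','n','g'] "png" (by decide) (by decide) (by decide) (by simpa using c2)]
    simp [c2]
  by_cases c3 : lowSuf t 4 = ['.','p','d','f']
  · rw [matched t ['p','d','f'] "pdf" (by decide) (by decide) (by decide) (by simpa using c3)]
    simp [c3]
  by_cases c4 : lowSuf t 4 = ['.','j','p','g']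
  · rw [matched t ['j','p','g'] "jpg" (by decide) (by decide) (by decide) (by simpa using c4)]
    simp [c4]
  by_cases c5 : lowSuf t 5 = ['.','j','p','e','g']
  · rw [matched t ['j','p','e','g'] "jpeg" (by decide) (by decide) (by decide) (by simpa using c5)]
    simp [c1, c2, c3, c4, c5]
  by_cases c6 : lowSuf t 4 = ['.','t','i','f']
  · rw [matched t ['t','i','f'] "tif" (by decide) (by decide) (by decide) (by simpa using c6)]
    simp [c5, c6]
  by_cases c7 : lowSuf t 5 = ['.','t','i','f','f']
  · rw [matched t ['t','i','f','f'] "tiff" (by decide) (by decide) (by decide) (by simpa using c7)]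
    simp [c1, c2, c3, c4, c6, c7]
  rw [unmatched t c1 c2 c3 c4 c5 c6 c7]
  simp [c1, c2, c3, c4, c5, c6, c7]

-- ===== VERDICT (by name: the statement is the Claim_ definition above) =====
theorem normalize_id_spec : Claim_equal_normalize_id := by
  intro s _
  unfold Spec_normalize_id normalize_id normalize_id_alt
  simp only [key, bCore]
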